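-- pv_equiv track=rewrite | github.com/rathakartik/blan | backend/server.py | extract_topics_from_messages
-- ===== SOURCE A (Python) =====
-- from typing import Optional, Dict, Any, List
-- from typing import Dict, List, Set, Optional, Any, Tuple
--
-- def extract_topics_from_messages(messages: List[str]) -> List[str]:
--     """Extract key topics from user messages"""
--     topics = []
--     keywords = {
--         "product": ["product", "service", "offer", "buy", "purchase", "price", "cost"],
--         "support": ["help", "problem", "issue", "error", "trouble", "fix", "support"],
--         "navigation": ["find", "where", "navigate", "locate", "search", "page"],
--         "information": ["about", "info", "details", "explain", "what", "how", "why"],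
--         "account": ["account", "login", "register", "profile", "settings", "password"]
--     }
--
--     for message in messages:
--         message_lower = message.lower()
--         for topic, words in keywords.items():
--             if any(word in message_lower for word in words):
--                 if topic not in topics:
--                     topics.append(topic)
--
--     return topics
-- ===== SOURCE B (Python) =====
-- def extract_topics_from_messages(messages):
--     """Extract key topics from user messages"""
--     keywords = {
--         "product": ["product", "service", "offer", "buy", "purchase", "price", "cost"],
--         "support": ["help", "problem", "issue", "error", "trouble", "fix", "support"],
--         "navigation": ["find", "where", "navigate", "locate", "search", "page"],
--         "information": ["about", "info", "details", "explain", "what", "how", "why"],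
--         "account": ["account", "login", "register", "profile", "settings", "password"]
--     }
--     # walk the messages with a dwindling list of not-yet-seen topics; no membership
--     # test against the output list is ever needed
--     remaining = list(keywords.items())
--     out = []
--     for message in messages:
--         if not remaining:
--             break
--         ml = message.lower()
--         out = out + [t for (t, ws) in remaining if any(w in ml for w in ws)]
--         remaining = [(t, ws) for (t, ws) in remaining if not any(w in ml for w in ws)]
--     return out
-- ===== Notes on version B (the rewrite author's own statement) =====
-- stated objective: alternative
-- what changed: Replaces A's append-on-first-sight loop with a growing output list and a membership test against it by a recursion over the messages that carries the dwindling list of not-yet-matched keyword rows, emitting each message's newly found topics by concatenation.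
import Mathlib
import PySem

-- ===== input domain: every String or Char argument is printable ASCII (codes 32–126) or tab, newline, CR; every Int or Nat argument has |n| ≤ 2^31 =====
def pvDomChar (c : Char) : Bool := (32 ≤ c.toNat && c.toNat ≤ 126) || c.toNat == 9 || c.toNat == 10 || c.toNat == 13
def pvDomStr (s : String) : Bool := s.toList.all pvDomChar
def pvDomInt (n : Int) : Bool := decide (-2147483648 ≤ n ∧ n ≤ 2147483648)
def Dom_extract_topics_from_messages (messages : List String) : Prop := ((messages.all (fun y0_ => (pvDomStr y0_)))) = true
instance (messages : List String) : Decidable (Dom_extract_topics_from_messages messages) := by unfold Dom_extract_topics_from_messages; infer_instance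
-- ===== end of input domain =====

-- B replaces A's growing-accumulator loop (with its membership test against the output list)
-- by a recursion over the messages carrying the dwindling list of not-yet-seen topics;
-- objective: alternative decomposition, same cost.

-- the keyword table both Pythons write as a literal dict
def pvKeywords : List (String × List String) :=
  [("product", ["product", "service", "offer", "buy", "purchase", "price", "cost"]),
   ("support", ["help", "problem", "issue", "error", "trouble", "fix", "support"]),
   ("navigation", ["find", "where", "navigate", "locate", "search", "page"]),
   ("information", ["about", "info", "details", "explain", "what", "how", "why"]),
   ("account", ["account", "login", "register", "profile", "settings", "password"])]

-- ===== PORT A =====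
def extract_topics_from_messages (messages : List String) : List String :=
  messages.foldl (fun topics message =>
    let message_lower := PySem.Str.lower message
    pvKeywords.foldl (fun topics tw =>
      if tw.2.any (fun word => PySem.Str.isIn word message_lower) then
        if topics.contains tw.1 then topics else topics ++ [tw.1]
      else topics) topics) []

-- ===== PORT B =====
def pvGo (remaining : List (String × List String)) (out : List String) (msgs : List String) : List String :=
  match msgs with
  | [] => out
  | m :: rest =>
    if remaining.isEmpty then out else
    let ml := PySem.Str.lower m
    pvGo (remaining.filter (fun tw => !(tw.2.any (fun w => PySem.Str.isIn w ml))))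
      (out ++ (remaining.filter (fun tw => tw.2.any (fun w => PySem.Str.isIn w ml))).map (fun tw => tw.1))
      rest

def extract_topics_from_messages_alt (messages : List String) : List String :=
  pvGo pvKeywords [] messages

-- ===== PRECONDITION & SPEC =====
def Spec_extract_topics_from_messages (messages : List String) (out : List String) : Prop := out = extract_topics_from_messages_alt messages
instance (messages : List String) (out : List String) : Decidable (Spec_extract_topics_from_messages messages out) := by unfold Spec_extract_topics_from_messages; infer_instance

-- ===== CLAIM (what is proved, stated in full; the proofs are below) =====
def Claim_equal_extract_topics_from_messages : Prop := ∀ (messages : List String), Dom_extract_topics_from_messages messages → Spec_extract_topics_from_messages messages (extract_topics_from_messages messages)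

-- ===== LEMMAS AND PROOFS =====

-- emit-style version of B's loop, used only by the proofs
def pvGoE (remaining : List (String × List String)) (msgs : List String) : List String :=
  match msgs with
  | [] => []
  | m :: rest =>
    if remaining.isEmpty then [] else
    let ml := PySem.Str.lower m
    (remaining.filter (fun tw => tw.2.any (fun w => PySem.Str.isIn w ml))).map (fun tw => tw.1)
      ++ pvGoE (remaining.filter (fun tw => !(tw.2.any (fun w => PySem.Str.isIn w ml)))) rest

-- B's loop is the emit-style recursion with the accumulator pulled out front
theorem pvGo_eq_pvGoE (msgs : List String) : ∀ (remaining : List (String × List String))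
    (out : List String), pvGo remaining out msgs = out ++ pvGoE remaining msgs := by
  induction msgs with
  | nil => intro remaining out; simp [pvGo, pvGoE]
  | cons m rest ih =>
    intro remaining out
    rw [show pvGo remaining out (m :: rest)
        = (if remaining.isEmpty then out else
          pvGo (remaining.filter (fun tw => !(tw.2.any (fun w => PySem.Str.isIn w (PySem.Str.lower m)))))
            (out ++ (remaining.filter (fun tw => tw.2.any (fun w => PySem.Str.isIn w (PySem.Str.lower m)))).map (fun tw => tw.1))
            rest) from rfl,
      show pvGoE remaining (m :: rest)
        = (if remaining.isEmpty then [] else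
          (remaining.filter (fun tw => tw.2.any (fun w => PySem.Str.isIn w (PySem.Str.lower m)))).map (fun tw => tw.1)
            ++ pvGoE (remaining.filter (fun tw => !(tw.2.any (fun w => PySem.Str.isIn w (PySem.Str.lower m))))) rest) from rfl]
    by_cases he : remaining.isEmpty <;> simp [he, ih]

-- B's recursion with no topics left emits nothing
theorem pvGoE_nil (msgs : List String) : pvGoE [] msgs = [] := by
  cases msgs <;> simp [pvGoE]

-- A's inner loop over the keyword table appends, in table order, the topics that hit the
-- message and are not already in the accumulator
theorem inner_loop_eq (K : List (String × List String)) (h : String × List String → Bool) :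
    ∀ acc : List String, (K.map Prod.fst).Nodup →
    K.foldl (fun topics tw =>
      if h tw then (if topics.contains tw.1 then topics else topics ++ [tw.1]) else topics) acc
    = acc ++ (K.filter (fun tw => h tw && !acc.contains tw.1)).map (fun tw => tw.1) := by
  induction K with
  | nil => intro acc _; simp
  | cons tw K' ih =>
    intro acc hnd
    simp only [List.map_cons, List.nodup_cons] at hnd
    obtain ⟨hhead, hnd'⟩ := hnd
    have ih' := ih acc hnd'
    rw [List.foldl_cons, List.filter_cons]
    cases hh : h tw with
    | false =>
      simp at ih' ⊢
      rw [ih']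
    | true =>
      cases hc : acc.contains tw.1 with
      | true =>
        simp at ih' ⊢
        rw [ih']
      | false =>
        have ih2 := ih (acc ++ [tw.1]) hnd'
        have hfil : K'.filter (fun tw' => h tw' && !(acc ++ [tw.1]).contains tw'.1)
            = K'.filter (fun tw' => h tw' && !acc.contains tw'.1) := by
          apply List.filter_congr
          intro tw' hmem
          have hne : tw'.1 ≠ tw.1 := fun he => hhead (he ▸ List.mem_map_of_mem hmem)
          simp [List.mem_append, hne]
        rw [hfil] at ih2
        simp at ih2 ⊢
        rw [ih2]

-- a topic name is in the projected filtered table iff its (unique, by Nodup) row passes the filter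
theorem mem_filter_map_fst (K : List (String × List String)) (p : String × List String → Bool)
    (hnd : (K.map Prod.fst).Nodup) (tw : String × List String) (hmem : tw ∈ K) :
    tw.1 ∈ (K.filter p).map (fun tw => tw.1) ↔ p tw = true := by
  constructor
  · intro hin
    obtain ⟨tw', htw', he⟩ := List.mem_map.mp hin
    obtain ⟨htw'K, hp⟩ := List.mem_filter.mp htw'
    have : tw' = tw := List.inj_on_of_nodup_map hnd htw'K hmem he
    rwa [this] at hp
  · intro hp
    exact List.mem_map.mpr ⟨tw, List.mem_filter.mpr ⟨hmem, hp⟩, rfl⟩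

-- main invariant: A's fold from any accumulator acc equals acc ++ B's recursion started on the
-- keyword rows whose topic is not yet in acc
theorem main_inv (K : List (String × List String)) (hnd : (K.map Prod.fst).Nodup) :
    ∀ (ms : List String) (acc : List String),
    ms.foldl (fun topics message =>
      K.foldl (fun topics tw =>
        if tw.2.any (fun word => PySem.Str.isIn word (PySem.Str.lower message)) then
          (if topics.contains tw.1 then topics else topics ++ [tw.1])
        else topics) topics) acc
    = acc ++ pvGoE (K.filter (fun tw => !acc.contains tw.1)) ms := by
  intro ms
  induction ms with
  | nil => intro acc; simp [pvGoE]
  | cons m ms' ih =>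
    intro acc
    rw [List.foldl_cons,
      inner_loop_eq K (fun tw => tw.2.any (fun word => PySem.Str.isIn word (PySem.Str.lower m))) acc hnd,
      ih]
    by_cases hemp : K.filter (fun tw => !acc.contains tw.1) = []
    · have hall : ∀ tw ∈ K, tw.1 ∈ acc := by
        intro tw htw
        by_contra hc
        have : tw ∈ K.filter (fun tw => !acc.contains tw.1) :=
          List.mem_filter.mpr ⟨htw, by simp [hc]⟩
        rw [hemp] at this
        simp at this
      have hFnil : K.filter (fun tw =>
          (tw.2.any (fun word => PySem.Str.isIn word (PySem.Str.lower m))) && !acc.contains tw.1) = [] := by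
        rw [List.filter_eq_nil_iff]
        intro tw htw
        simp [hall tw htw]
      rw [hFnil]
      simp only [List.map_nil, List.append_nil]
      rw [hemp]
      simp [pvGoE_nil]
    · rw [show pvGoE (K.filter (fun tw => !acc.contains tw.1)) (m :: ms')
          = (if (K.filter (fun tw => !acc.contains tw.1)).isEmpty then [] else
            ((K.filter (fun tw => !acc.contains tw.1)).filter (fun tw => tw.2.any (fun w => PySem.Str.isIn w (PySem.Str.lower m)))).map (fun tw => tw.1)
              ++ pvGoE ((K.filter (fun tw => !acc.contains tw.1)).filter (fun tw => !(tw.2.any (fun w => PySem.Str.isIn w (PySem.Str.lower m))))) ms') from rfl]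
      rw [if_neg (fun h => hemp (List.isEmpty_iff.mp h))]
      rw [List.filter_filter, List.filter_filter]
      have hrem : List.filter (fun a => (!a.2.any fun w => PySem.Str.isIn w (PySem.Str.lower m)) && !acc.contains a.1) K
          = List.filter (fun tw => !(acc ++ List.map (fun tw => tw.1) (List.filter (fun tw => (tw.2.any fun word => PySem.Str.isIn word (PySem.Str.lower m)) && !acc.contains tw.1) K)).contains tw.1) K := by
        apply List.filter_congr
        intro tw htw
        have hF := mem_filter_map_fst K
          (fun tw => (tw.2.any fun word => PySem.Str.isIn word (PySem.Str.lower m)) && !acc.contains tw.1) hnd tw htw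
        generalize hG : List.map (fun tw => tw.1) (List.filter (fun tw => (tw.2.any fun word => PySem.Str.isIn word (PySem.Str.lower m)) && !acc.contains tw.1) K) = F at hF ⊢
        by_cases hA : tw.1 ∈ acc
        · cases hH : tw.2.any fun word => PySem.Str.isIn word (PySem.Str.lower m) <;>
            simp [hA]
        · cases hH : tw.2.any fun word => PySem.Str.isIn word (PySem.Str.lower m)
          · simp [hA] at hF ⊢
            rw [hF]
            simp at hH
            simpa using hH
          · simp [hA] at hF ⊢
            rw [hF]
            simpa using hH
      rw [hrem, List.append_assoc]

-- ===== VERDICT (by name: the statement is the Claim_ definition above) =====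
theorem extract_topics_from_messages_spec : Claim_equal_extract_topics_from_messages := by
  intro messages _
  show extract_topics_from_messages messages = extract_topics_from_messages_alt messages
  have hnd : (pvKeywords.map Prod.fst).Nodup := by decide
  unfold extract_topics_from_messages extract_topics_from_messages_alt
  rw [main_inv pvKeywords hnd messages [], pvGo_eq_pvGoE]
  simp
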